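-- pv_equiv track=rewrite | github.com/cayspekko/bship | bshipbe.py | gen_board_file
-- ===== SOURCE A (Python) =====
-- def gen_board_file(ships):
-- 	board = []
-- 	for row in range(10):
-- 		for col in range(10):
-- 			if [row, col] in ships:
-- 				board.append('x')
-- 			else:
-- 				board.append('.')
-- 		board.append('\n')
-- 	return ''.join(board)
-- ===== SOURCE B (Python) =====
-- def gen_board_file(ships):
--     grid = [['.'] * 10 for _ in range(10)]
--     for ship in ships:
--         if len(ship) == 2:
--             r, c = ship
--             if 0 <= r < 10 and 0 <= c < 10:
--                 grid[r][c] = 'x'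
--     return ''.join(''.join(row) + '\n' for row in grid)
-- ===== Notes on version B (the rewrite author's own statement) =====
-- stated objective: idiomatic
-- what changed: B builds a 10x10 grid of '.' and marks only in-range length-2 ships by direct indexing, instead of testing list membership of every one of the 100 cells against the ships list.
import Mathlib
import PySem

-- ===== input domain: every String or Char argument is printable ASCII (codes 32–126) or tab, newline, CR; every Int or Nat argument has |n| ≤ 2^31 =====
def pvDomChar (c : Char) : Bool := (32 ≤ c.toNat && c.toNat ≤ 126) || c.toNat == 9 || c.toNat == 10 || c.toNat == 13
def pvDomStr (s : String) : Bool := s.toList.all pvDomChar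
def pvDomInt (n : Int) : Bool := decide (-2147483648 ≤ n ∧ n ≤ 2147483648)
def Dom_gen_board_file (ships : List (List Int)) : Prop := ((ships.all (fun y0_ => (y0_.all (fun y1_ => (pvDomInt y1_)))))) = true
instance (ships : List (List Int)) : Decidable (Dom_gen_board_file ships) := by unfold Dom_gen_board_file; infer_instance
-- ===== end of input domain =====

-- B builds a 10x10 grid and marks only in-range length-2 ships by direct indexing,
-- instead of testing membership of every cell in the ships list (idiomatic rewrite).


-- ===== PORT A =====
-- literal port of A: scan all 100 cells, appending 'x' iff [row,col] is a member of ships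
def gen_board_file (ships : List (List Int)) : String :=
  let board : List Char :=
    (PySem.List.pyRange 0 10 1).foldl (fun b row =>
      ((PySem.List.pyRange 0 10 1).foldl (fun b col =>
        b ++ [if [row, col] ∈ ships then 'x' else '.']) b) ++ ['\n']) []
  String.mk board

-- ===== PORT B =====
-- B: mark one ship on the grid (only length-2, in-range ships touch the grid)
def markShip (grid : List (List Char)) (ship : List Int) : List (List Char) :=
  match ship with
  | [r, c] =>
      if 0 ≤ r ∧ r < 10 ∧ 0 ≤ c ∧ c < 10 then
        grid.set r.toNat ((grid.getD r.toNat []).set c.toNat 'x')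
      else grid
  | _ => grid

def gen_board_file_alt (ships : List (List Int)) : String :=
  let grid := ships.foldl markShip (List.replicate 10 (List.replicate 10 '.'))
  String.mk (grid.foldl (fun acc row => acc ++ row ++ ['\n']) [])

-- ===== PRECONDITION & SPEC =====
def Spec_gen_board_file (ships : List (List Int)) (out : String) : Prop := out = gen_board_file_alt ships
instance (ships : List (List Int)) (out : String) : Decidable (Spec_gen_board_file ships out) := by unfold Spec_gen_board_file; infer_instance

-- ===== CLAIM (what is proved, stated in full; the proofs are below) =====
def Claim_equal_gen_board_file : Prop := ∀ (ships : List (List Int)), Dom_gen_board_file ships → Spec_gen_board_file ships (gen_board_file ships)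

-- ===== LEMMAS AND PROOFS =====

/-- the ten row/column indices, as integers -/
def L10 : List Int := [0, 1, 2, 3, 4, 5, 6, 7, 8, 9]

def cellChar (ships : List (List Int)) (r c : Int) : Char :=
  if [r, c] ∈ ships then 'x' else '.'

/-- the board both programs describe: cell (r,c) is 'x' iff [r,c] ∈ ships -/
def gridOf (ships : List (List Int)) : List (List Char) :=
  L10.map (fun r => L10.map (fun c => cellChar ships r c))

theorem pyRange10 : PySem.List.pyRange 0 10 1 = L10 := by decide

theorem L10_getElem (i : Nat) (h : i < L10.length) : L10[i] = (i : Int) := by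
  simp [L10] at h ⊢
  interval_cases i <;> rfl

theorem gridOf_congr {s t : List (List Int)}
    (h : ∀ r c : Int, 0 ≤ r → r < 10 → 0 ≤ c → c < 10 → ([r, c] ∈ s ↔ [r, c] ∈ t)) :
    gridOf s = gridOf t := by
  unfold gridOf
  apply List.map_congr_left
  intro r hr
  apply List.map_congr_left
  intro c hc
  simp [L10] at hr hc
  unfold cellChar
  have := h r c (by omega) (by omega) (by omega) (by omega)
  simp [this]

theorem map_set_eq_map {α β : Type} (l : List α) (f g : α → β) (k : Nat) (v : β)
    (h1 : ∀ (hk : k < l.length), v = g l[k])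
    (h2 : ∀ (j : Nat) (hj : j < l.length), j ≠ k → f l[j] = g l[j]) :
    (l.map f).set k v = l.map g := by
  apply List.ext_getElem (by simp)
  intro i hi hi'
  rw [List.getElem_set]
  split
  · next h => subst h; rw [List.getElem_map]; exact h1 (by simpa using hi')
  · next h => rw [List.getElem_map, List.getElem_map]; exact h2 i (by simpa using hi') (fun he => h he.symm)

theorem cellChar_append_ne (seen : List (List Int)) (s : List Int) (a b : Int)
    (h : [a, b] ≠ s) : cellChar (seen ++ [s]) a b = cellChar seen a b := by
  simp [cellChar, List.mem_append, h]

theorem markShip_gridOf (seen : List (List Int)) (s : List Int) :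
    markShip (gridOf seen) s = gridOf (seen ++ [s]) := by
  match s with
  | [] =>
      exact (gridOf_congr (by intro r c _ _ _ _; simp)).symm
  | [r] =>
      exact (gridOf_congr (by intro a b _ _ _ _; simp)).symm
  | r :: c :: x :: xs =>
      exact (gridOf_congr (by intro a b _ _ _ _; simp)).symm
  | [r, c] =>
      have hms : markShip (gridOf seen) [r, c]
          = if 0 ≤ r ∧ r < 10 ∧ 0 ≤ c ∧ c < 10 then
              (gridOf seen).set r.toNat (((gridOf seen).getD r.toNat []).set c.toNat 'x')
            else gridOf seen := rfl
      rw [hms]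
      by_cases hin : 0 ≤ r ∧ r < 10 ∧ 0 ≤ c ∧ c < 10
      · rw [if_pos hin]
        obtain ⟨hr0, hr1, hc0, hc1⟩ := hin
        have hrL : r.toNat < L10.length := by simp [L10]; omega
        have hcL : c.toNat < L10.length := by simp [L10]; omega
        have hrv : (r.toNat : Int) = r := Int.toNat_of_nonneg hr0
        have hcv : (c.toNat : Int) = c := Int.toNat_of_nonneg hc0
        have hgetD : (gridOf seen).getD r.toNat [] = L10.map (fun c' => cellChar seen r c') := by
          unfold gridOf
          rw [List.getD_eq_getElem _ _ (by simpa using hrL), List.getElem_map, L10_getElem, hrv]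
        rw [hgetD]
        have hinner : (L10.map (fun c' => cellChar seen r c')).set c.toNat 'x'
            = L10.map (fun c' => cellChar (seen ++ [[r, c]]) r c') := by
          apply map_set_eq_map
          · intro hk
            rw [L10_getElem, hcv]
            simp [cellChar]
          · intro j hj hne
            rw [L10_getElem]
            refine (cellChar_append_ne _ _ _ _ ?_).symm
            intro he
            simp at he
            exact hne (by omega)
        rw [hinner]
        unfold gridOf
        apply map_set_eq_map
        · intro hk
          rw [L10_getElem, hrv]
        · intro j hj hne
          rw [L10_getElem]
          apply List.map_congr_left
          intro c' _
          refine (cellChar_append_ne _ _ _ _ ?_).symm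
          intro he
          simp at he
          exact hne (by omega)
      · rw [if_neg hin]
        refine (gridOf_congr ?_).symm
        intro a b ha0 ha1 hb0 hb1
        constructor
        · intro h; rcases List.mem_append.mp h with h | h
          · exact h
          · simp at h; omega
        · intro h; exact List.mem_append.mpr (Or.inl h)

theorem foldl_markShip (ships seen : List (List Int)) :
    ships.foldl markShip (gridOf seen) = gridOf (seen ++ ships) := by
  induction ships generalizing seen with
  | nil => simp
  | cons s rest ih =>
      simp only [List.foldl_cons, markShip_gridOf]
      rw [ih]
      simp

theorem gridOf_nil : gridOf [] = List.replicate 10 (List.replicate 10 '.') := by decide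

-- ===== VERDICT (by name: the statement is the Claim_ definition above) =====
theorem gen_board_file_spec : Claim_equal_gen_board_file := by
  intro ships _
  unfold Spec_gen_board_file gen_board_file gen_board_file_alt
  rw [← gridOf_nil, foldl_markShip]
  simp only [List.nil_append]
  apply congrArg String.mk
  rw [pyRange10]
  have hA : L10.foldl (fun b row =>
        (L10.foldl (fun b col => b ++ [if [row, col] ∈ ships then 'x' else '.']) b) ++ ['\n']) []
      = L10.flatMap (fun row =>
          L10.map (fun col => if [row, col] ∈ ships then 'x' else '.') ++ ['\n']) := by
    rw [PySem.List.foldl_congr_mem (g := fun b row =>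
        b ++ (L10.map (fun col => if [row, col] ∈ ships then 'x' else '.') ++ ['\n']))]
    · rw [PySem.List.foldl_append_eq_flatMap, List.nil_append]
    · intro acc row _
      rw [PySem.List.foldl_append_singleton_eq_map, List.append_assoc]
  rw [hA]
  rw [PySem.List.foldl_congr_mem (l := gridOf ships)
      (g := fun acc row => acc ++ (row ++ ['\n']))
      (h := fun acc row _ => List.append_assoc acc row ['\n'])]
  rw [PySem.List.foldl_append_eq_flatMap, List.nil_append]
  unfold gridOf cellChar
  rw [List.flatMap_map]
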